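-- pv_equiv track=rewrite | github.com/peterpeeterspeter/workspace | scripts/simple-cleanup.py | wrap_loose_lis
-- ===== SOURCE A (Python) =====
-- def wrap_loose_lis(content):
--     """Wrap <li> tags that aren't in <ul> or <ol>"""
--     # Simple approach: find consecutive <li> tags and wrap them
--     result = []
--     lines = content.split('\n')
--     i = 0
--
--     while i < len(lines):
--         line = lines[i]
--
--         # Check if this line contains a loose <li>
--         if '<li>' in line and '</li>' in line:
--             # Check if it's NOT already inside a list
--             if not any(tag in '\n'.join(lines[max(0,i-5):i]) for tag in ['<ul>', '<ol>']):
--                 # Start of a list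
--                 result.append('<ul>')
--                 result.append(line)
--
--                 # Add subsequent <li> tags
--                 i += 1
--                 while i < len(lines) and '<li>' in lines[i] and '</li>' in lines[i]:
--                     # Make sure we're not inside a different tag
--                     if not any(tag in lines[i] for tag in ['</ul>', '</ol>', '<ul>', '<ol>']):
--                         result.append(lines[i])
--                     else:
--                         break
--                     i += 1
--
--                 result.append('</ul>')
--                 continue
--
--         result.append(line)
--         i += 1
--
--     return '\n'.join(result)
-- ===== SOURCE B (Python) =====
-- def wrap_loose_lis(content):
--     """Wrap <li> tags that aren't in <ul> or <ol> - single pass with an in_list flag."""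
--     lines = content.split('\n')
--     out = []
--     in_list = False
--     for i, line in enumerate(lines):
--         if in_list:
--             if ('<li>' in line and '</li>' in line
--                     and not any(t in line for t in ('</ul>', '</ol>', '<ul>', '<ol>'))):
--                 out.append(line)
--                 continue
--             out.append('</ul>')
--             in_list = False
--         if ('<li>' in line and '</li>' in line
--                 and not any(t in '\n'.join(lines[max(0, i - 5):i]) for t in ('<ul>', '<ol>'))):
--             out.append('<ul>')
--             in_list = True
--         out.append(line)
--     if in_list:
--         out.append('</ul>')
--     return '\n'.join(out)
-- ===== Notes on version B (the rewrite author's own statement) =====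
-- stated objective: simpler
-- what changed: Replaced A's nested while-loops with index re-handling by a single linear for-pass driven by an in_list state flag that closes the open list and falls through to re-process the current line in the same step.
import Mathlib
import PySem

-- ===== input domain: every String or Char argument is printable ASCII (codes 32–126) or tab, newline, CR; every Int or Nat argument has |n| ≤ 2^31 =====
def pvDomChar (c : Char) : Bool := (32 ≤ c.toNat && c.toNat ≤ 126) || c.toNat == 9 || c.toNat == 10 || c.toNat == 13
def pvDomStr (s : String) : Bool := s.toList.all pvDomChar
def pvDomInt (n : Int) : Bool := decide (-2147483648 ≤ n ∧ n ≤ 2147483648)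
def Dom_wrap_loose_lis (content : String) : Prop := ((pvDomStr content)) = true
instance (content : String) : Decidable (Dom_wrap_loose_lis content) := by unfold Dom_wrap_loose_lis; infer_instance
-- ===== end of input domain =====

-- B replaces A's nested while-loops (inner loop consuming li-lines, index re-handled on break)
-- by one linear pass with an in_list state flag; same output, simpler control flow (objective: simpler).


-- shared helpers: literal transliterations of expressions both Pythons contain verbatim
-- '<li>' in line and '</li>' in line
def pvIsLi (line : String) : Bool :=
  PySem.Str.isIn "<li>" line && PySem.Str.isIn "</li>" line

-- any(tag in line for tag in ['</ul>', '</ol>', '<ul>', '<ol>'])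
def pvHasListTag (line : String) : Bool :=
  PySem.Str.isIn "</ul>" line || PySem.Str.isIn "</ol>" line ||
  PySem.Str.isIn "<ul>" line || PySem.Str.isIn "<ol>" line

-- any(tag in '\n'.join(lines[max(0,i-5):i]) for tag in ['<ul>', '<ol>'])
def pvWindowHasList (lines : List String) (i : Nat) : Bool :=
  let w := PySem.Str.join "\n" (PySem.List.slice lines (some (max 0 ((i : Int) - 5))) (some (i : Int)))
  PySem.Str.isIn "<ul>" w || PySem.Str.isIn "<ol>" w

-- ===== PORT A =====
-- A's outer while-loop (index i) and inner while-loop (consumes subsequent li-lines, then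
-- appends '</ul>' and continues the outer loop at the current index), as mutual recursion.
-- `fuel` is only a structural-termination guard (2*len+1 at entry always suffices); the
-- fuel-0 branch is never reached on the ports' calls.
mutual
def wrapA_outer (lines : List String) : Nat → Nat → List String → List String
  | 0, _, res => res
  | fuel + 1, i, res =>
    if i < lines.length then
      let line := lines.getD i ""
      if pvIsLi line then
        if !pvWindowHasList lines i then
          wrapA_inner lines fuel (i + 1) (res ++ ["<ul>", line])
        else
          wrapA_outer lines fuel (i + 1) (res ++ [line])
      else
        wrapA_outer lines fuel (i + 1) (res ++ [line])
    else res

def wrapA_inner (lines : List String) : Nat → Nat → List String → List String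
  | 0, _, res => res
  | fuel + 1, j, res =>
    if j < lines.length then
      if pvIsLi (lines.getD j "") then
        if !pvHasListTag (lines.getD j "") then
          wrapA_inner lines fuel (j + 1) (res ++ [lines.getD j ""])
        else
          wrapA_outer lines fuel j (res ++ ["</ul>"])
      else
        wrapA_outer lines fuel j (res ++ ["</ul>"])
    else wrapA_outer lines fuel j (res ++ ["</ul>"])
end

def wrap_loose_lis (content : String) : String :=
  PySem.Str.join "\n" (wrapA_outer ((PySem.Str.split? content "\n").getD [])
    (2 * ((PySem.Str.split? content "\n").getD []).length + 1) 0 [])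

-- ===== PORT B =====
-- B's single for-loop with the in_list flag (close the list and fall through to the
-- start-check on the same line), as one recursion over the index; `fuel` is again only
-- a structural-termination guard (len+1 at entry suffices).
def wrapB_go (lines : List String) : Nat → Nat → Bool → List String → List String
  | 0, _, _, out => out
  | fuel + 1, i, inList, out =>
    if i < lines.length then
      let line := lines.getD i ""
      if inList && (pvIsLi line && !pvHasListTag line) then
        wrapB_go lines fuel (i + 1) true (out ++ [line])
      else
        let out1 := if inList then out ++ ["</ul>"] else out
        if pvIsLi line && !pvWindowHasList lines i then
          wrapB_go lines fuel (i + 1) true (out1 ++ ["<ul>", line])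
        else
          wrapB_go lines fuel (i + 1) false (out1 ++ [line])
    else if inList then out ++ ["</ul>"] else out

def wrap_loose_lis_alt (content : String) : String :=
  PySem.Str.join "\n" (wrapB_go ((PySem.Str.split? content "\n").getD [])
    (((PySem.Str.split? content "\n").getD []).length + 1) 0 false [])

-- ===== PRECONDITION & SPEC =====
def Spec_wrap_loose_lis (content : String) (out : String) : Prop := out = wrap_loose_lis_alt content
instance (content : String) (out : String) : Decidable (Spec_wrap_loose_lis content out) := by unfold Spec_wrap_loose_lis; infer_instance

-- ===== CLAIM (what is proved, stated in full; the proofs are below) =====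
def Claim_equal_wrap_loose_lis : Prop := ∀ (content : String), Dom_wrap_loose_lis content → Spec_wrap_loose_lis content (wrap_loose_lis content)

-- ===== LEMMAS AND PROOFS =====

-- one-step unfolding equations for the three loop functions (definitional)
lemma wrapA_outer_succ (lines : List String) (fuel i : Nat) (res : List String) :
    wrapA_outer lines (fuel + 1) i res =
      if i < lines.length then
        if pvIsLi (lines.getD i "") then
          if !pvWindowHasList lines i then
            wrapA_inner lines fuel (i + 1) (res ++ ["<ul>", lines.getD i ""])
          else wrapA_outer lines fuel (i + 1) (res ++ [lines.getD i ""])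
        else wrapA_outer lines fuel (i + 1) (res ++ [lines.getD i ""])
      else res := rfl

lemma wrapA_inner_succ (lines : List String) (fuel j : Nat) (res : List String) :
    wrapA_inner lines (fuel + 1) j res =
      if j < lines.length then
        if pvIsLi (lines.getD j "") then
          if !pvHasListTag (lines.getD j "") then
            wrapA_inner lines fuel (j + 1) (res ++ [lines.getD j ""])
          else wrapA_outer lines fuel j (res ++ ["</ul>"])
        else wrapA_outer lines fuel j (res ++ ["</ul>"])
      else wrapA_outer lines fuel j (res ++ ["</ul>"]) := rfl

lemma wrapB_go_succ (lines : List String) (fuel i : Nat) (inList : Bool) (out : List String) :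
    wrapB_go lines (fuel + 1) i inList out =
      if i < lines.length then
        if inList && (pvIsLi (lines.getD i "") && !pvHasListTag (lines.getD i "")) then
          wrapB_go lines fuel (i + 1) true (out ++ [lines.getD i ""])
        else
          if pvIsLi (lines.getD i "") && !pvWindowHasList lines i then
            wrapB_go lines fuel (i + 1) true
              ((if inList then out ++ ["</ul>"] else out) ++ ["<ul>", lines.getD i ""])
          else
            wrapB_go lines fuel (i + 1) false
              ((if inList then out ++ ["</ul>"] else out) ++ [lines.getD i ""])
      else if inList then out ++ ["</ul>"] else out := rfl

-- Loop equivalence: with enough fuel, A's outer loop equals B's pass with in_list = false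
-- and A's inner loop equals B's pass with in_list = true, for every start index and
-- accumulated output.  Induction on the number of remaining lines.
lemma wrap_main (lines : List String) :
    ∀ k i, lines.length - i ≤ k → ∀ (fa fb : Nat) (res : List String),
      2 * (lines.length - i) + 1 ≤ fa → lines.length - i + 1 ≤ fb →
      wrapA_outer lines fa i res = wrapB_go lines fb i false res ∧
      (2 * (lines.length - i) + 2 ≤ fa →
        wrapA_inner lines fa i res = wrapB_go lines fb i true res) := by
  intro k
  induction k with
  | zero =>
    intro i hi fa fb res hfa hfb
    have h : ¬ i < lines.length := by omega
    obtain ⟨fa, rfl⟩ : ∃ m, fa = m + 1 := ⟨fa - 1, by omega⟩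
    obtain ⟨fb, rfl⟩ : ∃ m, fb = m + 1 := ⟨fb - 1, by omega⟩
    refine ⟨?_, fun hfa2 => ?_⟩
    · rw [wrapA_outer_succ, wrapB_go_succ, if_neg h, if_neg h,
        if_neg Bool.false_ne_true]
    · obtain ⟨fa, rfl⟩ : ∃ m, fa = m + 1 := ⟨fa - 1, by omega⟩
      rw [wrapA_inner_succ, if_neg h, wrapA_outer_succ, if_neg h,
        wrapB_go_succ, if_neg h, if_pos rfl]
  | succ k ih =>
    intro i hi fa fb res hfa hfb
    by_cases h : i < lines.length
    · have hk : lines.length - (i + 1) ≤ k := by omega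
      have hg : lines.getD i "" = lines[i] := by
        simp [List.getD_eq_getElem?_getD, List.getElem?_eq_getElem h]
      obtain ⟨fa, rfl⟩ : ∃ m, fa = m + 1 := ⟨fa - 1, by omega⟩
      obtain ⟨fb, rfl⟩ : ∃ m, fb = m + 1 := ⟨fb - 1, by omega⟩
      have hfb' : lines.length - (i + 1) + 1 ≤ fb := by omega
      -- one outer step of A against one step of B with in_list = false, for any
      -- sufficient A-fuel (used twice below with different fuels)
      have houter : ∀ fa' : Nat, 2 * (lines.length - i) + 1 ≤ fa' + 1 →
          ∀ r : List String,
          wrapA_outer lines (fa' + 1) i r = wrapB_go lines (fb + 1) i false r := by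
        intro fa' hfa' r
        rw [wrapA_outer_succ, wrapB_go_succ, if_pos h, if_pos h, hg]
        simp only [Bool.false_and, if_neg Bool.false_ne_true]
        cases hli : pvIsLi lines[i] with
        | false =>
          simp only [Bool.false_and, if_neg Bool.false_ne_true]
          exact (ih (i + 1) hk fa' fb _ (by omega) hfb').1
        | true =>
          cases hw : pvWindowHasList lines i with
          | false =>
            simp only [Bool.not_false, Bool.true_and]
            exact (ih (i + 1) hk fa' fb _ (by omega) hfb').2 (by omega)
          | true =>
            simp only [Bool.not_true, Bool.and_false, if_neg Bool.false_ne_true]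
            exact (ih (i + 1) hk fa' fb _ (by omega) hfb').1
      refine ⟨houter fa hfa res, fun hfa2 => ?_⟩
      obtain ⟨fa, rfl⟩ : ∃ m, fa = m + 1 := ⟨fa - 1, by omega⟩
      rw [wrapA_inner_succ, if_pos h, hg]
      cases hli : pvIsLi lines[i] with
      | true =>
        cases ht : pvHasListTag lines[i] with
        | false =>
          -- the inner loop consumes the line; so does B with in_list = true
          simp only [Bool.not_false]
          rw [(ih (i + 1) hk (fa + 1) fb _ (by omega) hfb').2 (by omega)]
          rw [wrapB_go_succ, if_pos h, hg]
          simp [hli, ht]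
        | true =>
          -- the inner loop breaks: A goes back to the outer loop with '</ul>' appended;
          -- B closes the list and does the start-check on the same line.
          simp only [Bool.not_true, if_neg Bool.false_ne_true]
          rw [houter fa (by omega)]
          rw [wrapB_go_succ, wrapB_go_succ, if_pos h, if_pos h, hg]
          simp [hli, ht]
      | false =>
        simp only [if_neg Bool.false_ne_true]
        rw [houter fa (by omega)]
        rw [wrapB_go_succ, wrapB_go_succ, if_pos h, if_pos h, hg]
        simp [hli]
    · have hk := h
      obtain ⟨fa, rfl⟩ : ∃ m, fa = m + 1 := ⟨fa - 1, by omega⟩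
      obtain ⟨fb, rfl⟩ : ∃ m, fb = m + 1 := ⟨fb - 1, by omega⟩
      refine ⟨?_, fun hfa2 => ?_⟩
      · rw [wrapA_outer_succ, wrapB_go_succ, if_neg h, if_neg h,
          if_neg Bool.false_ne_true]
      · obtain ⟨fa, rfl⟩ : ∃ m, fa = m + 1 := ⟨fa - 1, by omega⟩
        rw [wrapA_inner_succ, if_neg h, wrapA_outer_succ, if_neg h,
          wrapB_go_succ, if_neg h, if_pos rfl]

-- ===== VERDICT (by name: the statement is the Claim_ definition above) =====
theorem wrap_loose_lis_spec : Claim_equal_wrap_loose_lis := by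
  intro content _
  unfold Spec_wrap_loose_lis wrap_loose_lis wrap_loose_lis_alt
  rw [(wrap_main ((PySem.Str.split? content "\n").getD [])
      ((PySem.Str.split? content "\n").getD []).length 0 (by omega)
      (2 * ((PySem.Str.split? content "\n").getD []).length + 1)
      (((PySem.Str.split? content "\n").getD []).length + 1) [] (by omega) (by omega)).1]
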